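-- pv_equiv track=rewrite | github.com/BagdaJD/Study | PythonPractise/Python_Study/Cases/Dop_exercises/Aidiniaan_second_task.py | find_abbreviation
-- ===== SOURCE A (Python) =====
-- def find_abbreviation(s):
--     words = s.split()
--     abbreviations = []
--     current_abbr = ''
--
--     for word in words:
--         if word.isupper():
--             current_abbr += word + ' '
--         else:
--             if current_abbr.strip():
--                 abbreviations += [current_abbr.strip()]
--                 current_abbr = ''
--
--     if current_abbr.strip():
--         abbreviations += [current_abbr.strip()]
--
--     return abbreviations
-- ===== SOURCE B (Python) =====
-- def find_abbreviation(s):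
--     # Run-scan: consume each maximal run of uppercase words in one inner loop
--     # and emit ' '.join(run); no string accumulator, no post-loop flush.
--     words = s.split()
--     out = []
--     while words:
--         w, words = words[0], words[1:]
--         if w.isupper():
--             run = [w]
--             while words and words[0].isupper():
--                 run.append(words[0])
--                 words = words[1:]
--             out.append(' '.join(run))
--     return out
-- ===== Notes on version B (the rewrite author's own statement) =====
-- stated objective: alternative
-- what changed: Replaces A's string accumulator with trailing-space bookkeeping, strip-based flushes and a duplicated post-loop flush by a run-scan: an inner loop consumes each maximal run of uppercase words and emits the space-joined run directly.
import Mathlib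
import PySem

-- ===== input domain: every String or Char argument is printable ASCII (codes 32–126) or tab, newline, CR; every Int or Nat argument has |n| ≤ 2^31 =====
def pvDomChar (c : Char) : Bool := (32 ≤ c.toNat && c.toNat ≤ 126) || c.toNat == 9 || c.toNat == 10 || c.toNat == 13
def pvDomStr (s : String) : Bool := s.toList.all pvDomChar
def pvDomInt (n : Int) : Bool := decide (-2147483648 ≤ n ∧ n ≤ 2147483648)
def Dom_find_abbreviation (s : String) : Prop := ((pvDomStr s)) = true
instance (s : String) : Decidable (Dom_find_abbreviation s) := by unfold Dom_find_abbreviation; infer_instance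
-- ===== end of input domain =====

-- ===== PORT A =====
-- B changes: run-scan emitting ' '.join of each maximal uppercase-word run, instead of
-- A's string accumulator with strip-based flushes (objective: alternative; same cost).

-- word.isupper(): at least one cased char, all cased chars uppercase — exact on the
-- ASCII domain, where the cased chars are exactly the letters (hand-ported; shared
-- primitive of both Pythons).
def pyWordIsupper (w : List Char) : Bool :=
  w.any PySem.Chars.isupper && w.all (fun c => !PySem.Chars.islower c)

-- the for-loop of A over words, state = (abbreviations, current_abbr)
def find_abbreviation_go (ws : List (List Char)) (abbrs : List String) (cur : List Char) :
    List String :=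
  match ws with
  | [] =>
      if PySem.Chars.strip cur ≠ [] then abbrs ++ [String.ofList (PySem.Chars.strip cur)]
      else abbrs
  | w :: rest =>
      if pyWordIsupper w then find_abbreviation_go rest abbrs (cur ++ w ++ [' '])
      else if PySem.Chars.strip cur ≠ [] then
        find_abbreviation_go rest (abbrs ++ [String.ofList (PySem.Chars.strip cur)]) []
      else find_abbreviation_go rest abbrs cur

def find_abbreviation (s : String) : List String :=
  find_abbreviation_go (PySem.Chars.split₀ s.toList) [] []

-- ===== PORT B =====
-- outer while-loop of B; the inner run-collecting while-loop is takeWhile/dropWhile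
def find_abbreviation_alt_go (ws : List (List Char)) : List String :=
  match ws with
  | [] => []
  | w :: rest =>
      if pyWordIsupper w then
        String.ofList (PySem.Chars.join [' '] (w :: rest.takeWhile pyWordIsupper)) ::
          find_abbreviation_alt_go (rest.dropWhile pyWordIsupper)
      else find_abbreviation_alt_go rest
  termination_by ws.length
  decreasing_by
  · have := List.length_dropWhile_le pyWordIsupper rest; simp; omega
  · simp

def find_abbreviation_alt (s : String) : List String :=
  find_abbreviation_alt_go (PySem.Chars.split₀ s.toList)

-- ===== PRECONDITION & SPEC =====
def Spec_find_abbreviation (s : String) (out : List String) : Prop := out = find_abbreviation_alt s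
instance (s : String) (out : List String) : Decidable (Spec_find_abbreviation s out) := by unfold Spec_find_abbreviation; infer_instance

-- ===== CLAIM (what is proved, stated in full; the proofs are below) =====
def Claim_equal_find_abbreviation : Prop := ∀ (s : String), Dom_find_abbreviation s → Spec_find_abbreviation s (find_abbreviation s)

-- ===== LEMMAS AND PROOFS =====

-- a "good" word: nonempty and whitespace-free (what s.split() produces)
def pvGood (w : List Char) : Prop := w ≠ [] ∧ ∀ c ∈ w, PySem.Chars.isspace c = false

theorem pvSplit₀_go_good : ∀ (s cur : List Char) (acc : List (List Char)),
    (∀ c ∈ cur, PySem.Chars.isspace c = false) →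
    (∀ w ∈ acc, pvGood w) →
    ∀ w ∈ PySem.Chars.split₀.go s cur acc, pvGood w := by
  intro s
  induction s with
  | nil =>
    intro cur acc hc ha w hw
    unfold PySem.Chars.split₀.go at hw
    by_cases h : cur.isEmpty
    · simp [h] at hw; exact ha w hw
    · simp [h] at hw
      rcases hw with hw | rfl
      · exact ha w hw
      · exact ⟨by simp [List.isEmpty_iff] at h; simpa using h,
               fun d hd => hc d (by simpa using hd)⟩
  | cons c rest ih =>
    intro cur acc hc ha w hw
    unfold PySem.Chars.split₀.go at hw
    by_cases hs : PySem.Chars.isspace c <;> by_cases he : cur.isEmpty <;>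
      simp only [hs, he, if_true, if_false, Bool.false_eq_true] at hw
    · exact ih [] acc (by simp) ha w hw
    · refine ih [] (cur.reverse :: acc) (by simp) ?_ w hw
      intro v hv
      rcases List.mem_cons.mp hv with rfl | hv
      · exact ⟨by simp [List.isEmpty_iff] at he; simpa using he,
               fun d hd => hc d (by simpa using hd)⟩
      · exact ha v hv
    · refine ih (c :: cur) acc ?_ ha w hw
      intro d hd
      rcases List.mem_cons.mp hd with rfl | hd
      · simpa using hs
      · exact hc d hd
    · refine ih (c :: cur) acc ?_ ha w hw
      intro d hd
      rcases List.mem_cons.mp hd with rfl | hd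
      · simpa using hs
      · exact hc d hd

theorem pvSplit₀_good (s : List Char) : ∀ w ∈ PySem.Chars.split₀ s, pvGood w := by
  unfold PySem.Chars.split₀
  exact pvSplit₀_go_good s [] [] (by simp) (by simp)

-- A's accumulator after a run: the run's words each followed by one space
def pvFlat (run : List (List Char)) : List Char := run.flatMap (fun w => w ++ [' '])

theorem pvDropWhile_all (p : Char → Bool) (l : List Char) (h : ∀ c ∈ l, p c = false) :
    l.dropWhile p = l := by
  cases l with
  | nil => rfl
  | cons c t => rw [List.dropWhile_cons_of_neg (by simp [h c (by simp)])]

theorem pvRstrip_append (w t : List Char) (hne : t ≠ [])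
    (ht : PySem.Chars.rstrip t = t) : PySem.Chars.rstrip (w ++ t) = w ++ t := by
  obtain ⟨c, r, hcr⟩ : ∃ c r, t.reverse = c :: r := by
    cases h : t.reverse with
    | nil => exact absurd (by simpa using h) hne
    | cons c r => exact ⟨c, r, rfl⟩
  have hdw : List.dropWhile PySem.Chars.isspace t.reverse = t.reverse := by
    unfold PySem.Chars.rstrip at ht
    have := congrArg List.reverse ht
    simpa using this
  have hc : PySem.Chars.isspace c = false := by
    by_contra h
    rw [hcr, List.dropWhile_cons_of_pos (by simpa using h)] at hdw
    have h1 := congrArg List.length hdw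
    have h2 := List.length_dropWhile_le PySem.Chars.isspace r
    simp only [List.length_cons] at h1
    omega
  unfold PySem.Chars.rstrip
  rw [List.reverse_append, hcr, List.cons_append,
    List.dropWhile_cons_of_neg (by simp [hc])]
  simp [← List.cons_append, ← hcr]

theorem pvRstrip_nospace (w : List Char) (h : ∀ c ∈ w, PySem.Chars.isspace c = false) :
    PySem.Chars.rstrip w = w := by
  unfold PySem.Chars.rstrip
  rw [pvDropWhile_all _ _ (by simpa using h), List.reverse_reverse]

theorem pvJoin_rstrip (run : List (List Char)) (hne : run ≠ [])
    (hg : ∀ w ∈ run, pvGood w) :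
    PySem.Chars.rstrip (PySem.Chars.join [' '] run) = PySem.Chars.join [' '] run ∧
      PySem.Chars.join [' '] run ≠ [] := by
  induction run with
  | nil => simp at hne
  | cons w rest ih =>
    cases rest with
    | nil =>
      refine ⟨?_, ?_⟩
      · simpa [PySem.Chars.join, List.intercalate] using
          pvRstrip_nospace w (hg w (by simp)).2
      · simpa [PySem.Chars.join, List.intercalate] using (hg w (by simp)).1
    | cons v l =>
      have ih' := ih (by simp) (fun u hu => hg u (by simp [hu]))
      have hj : PySem.Chars.join [' '] (w :: v :: l) =
          (w ++ [' ']) ++ PySem.Chars.join [' '] (v :: l) := by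
        simp [PySem.Chars.join, List.intercalate, List.intersperse]
      rw [hj]
      refine ⟨pvRstrip_append _ _ ih'.2 ih'.1, by simp⟩

theorem pvJoin_ne_nil (run : List (List Char)) (hne : run ≠ [])
    (hg : ∀ w ∈ run, pvGood w) : PySem.Chars.join [' '] run ≠ [] :=
  (pvJoin_rstrip run hne hg).2

theorem pvJoin_head (w : List Char) (rest : List (List Char)) :
    ∃ X, PySem.Chars.join [' '] (w :: rest) = w ++ X := by
  cases rest with
  | nil => exact ⟨[], by simp [PySem.Chars.join, List.intercalate]⟩
  | cons v l =>
    refine ⟨' ' :: (List.intersperse [' '] (v :: l)).flatten, ?_⟩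
    simp [PySem.Chars.join, List.intercalate, List.intersperse]

theorem pvFlat_eq (run : List (List Char)) (hne : run ≠ []) :
    pvFlat run = PySem.Chars.join [' '] run ++ [' '] := by
  induction run with
  | nil => simp at hne
  | cons w rest ih =>
    cases rest with
    | nil => simp [pvFlat, PySem.Chars.join, List.intercalate]
    | cons v l =>
      have := ih (by simp)
      simp only [pvFlat, List.flatMap_cons] at this ⊢
      rw [this]
      simp [PySem.Chars.join, List.intercalate, List.intersperse]

theorem pvStrip_flat (run : List (List Char)) (hne : run ≠ [])
    (hg : ∀ w ∈ run, pvGood w) :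
    PySem.Chars.strip (pvFlat run) = PySem.Chars.join [' '] run := by
  obtain ⟨w, rest, rfl⟩ : ∃ w rest, run = w :: rest := by
    cases run with
    | nil => simp at hne
    | cons w rest => exact ⟨w, rest, rfl⟩
  obtain ⟨X, hX⟩ := pvJoin_head w rest
  obtain ⟨c, w', rfl⟩ : ∃ c w', w = c :: w' := by
    rcases hg w (by simp) with ⟨h1, _⟩
    cases w with
    | nil => simp at h1
    | cons c w' => exact ⟨c, w', rfl⟩
  have hc : PySem.Chars.isspace c = false := (hg (c :: w') (by simp)).2 c (by simp)
  rw [pvFlat_eq _ hne]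
  unfold PySem.Chars.strip
  have hl : PySem.Chars.lstrip (PySem.Chars.join [' '] ((c :: w') :: rest) ++ [' ']) =
      PySem.Chars.join [' '] ((c :: w') :: rest) ++ [' '] := by
    rw [hX]
    unfold PySem.Chars.lstrip
    rw [List.cons_append, List.cons_append, List.dropWhile_cons_of_neg (by simp [hc])]
  rw [hl]
  have h2 : PySem.Chars.rstrip (PySem.Chars.join [' '] ((c :: w') :: rest) ++ [' ']) =
      PySem.Chars.rstrip (PySem.Chars.join [' '] ((c :: w') :: rest)) := by
    unfold PySem.Chars.rstrip
    rw [List.reverse_append]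
    simp [List.dropWhile_cons_of_pos, show PySem.Chars.isspace ' ' = true by decide]
  rw [h2, (pvJoin_rstrip _ hne hg).1]

theorem pvStrip_nil : PySem.Chars.strip ([] : List Char) = [] := by
  simp [PySem.Chars.strip, PySem.Chars.lstrip, PySem.Chars.rstrip]

-- equation lemmas for the well-founded find_abbreviation_alt_go
theorem pvAltgo_nil : find_abbreviation_alt_go [] = [] := by
  rw [find_abbreviation_alt_go.eq_def]

theorem pvAltgo_cons (w : List Char) (rest : List (List Char)) :
    find_abbreviation_alt_go (w :: rest) =
      if pyWordIsupper w then
        String.ofList (PySem.Chars.join [' '] (w :: rest.takeWhile pyWordIsupper)) ::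
          find_abbreviation_alt_go (rest.dropWhile pyWordIsupper)
      else find_abbreviation_alt_go rest := by
  rw [find_abbreviation_alt_go.eq_def]

-- B mid-run: run already collected (nonempty), ws the remaining words
def pvGoB2 (run ws : List (List Char)) : List String :=
  match ws with
  | [] => [String.ofList (PySem.Chars.join [' '] run)]
  | w :: rest =>
      if pyWordIsupper w then pvGoB2 (run ++ [w]) rest
      else String.ofList (PySem.Chars.join [' '] run) :: find_abbreviation_alt_go rest

theorem pvGoB2_eq (ws : List (List Char)) : ∀ run,
    pvGoB2 run ws =
      String.ofList (PySem.Chars.join [' '] (run ++ ws.takeWhile pyWordIsupper)) ::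
        find_abbreviation_alt_go (ws.dropWhile pyWordIsupper) := by
  induction ws with
  | nil => intro run; simp [pvGoB2, pvAltgo_nil]
  | cons w rest ih =>
    intro run
    by_cases h : pyWordIsupper w
    · rw [List.takeWhile_cons_of_pos h, List.dropWhile_cons_of_pos h]
      simp only [pvGoB2, h, if_true, ih (run ++ [w]), List.append_assoc,
        List.singleton_append]
    · rw [List.takeWhile_cons_of_neg (by simpa using h),
        List.dropWhile_cons_of_neg (by simpa using h), pvAltgo_cons]
      simp [pvGoB2, h]

theorem pvMain (ws : List (List Char)) (hg : ∀ w ∈ ws, pvGood w) :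
    (∀ abbrs, find_abbreviation_go ws abbrs [] = abbrs ++ find_abbreviation_alt_go ws) ∧
    (∀ abbrs run, run ≠ [] → (∀ w ∈ run, pvGood w) →
      find_abbreviation_go ws abbrs (pvFlat run) = abbrs ++ pvGoB2 run ws) := by
  induction ws with
  | nil =>
    refine ⟨?_, ?_⟩
    · intro abbrs
      simp [find_abbreviation_go, pvAltgo_nil, pvStrip_nil]
    · intro abbrs run hrne hrg
      simp only [find_abbreviation_go, pvStrip_flat run hrne hrg, pvGoB2,
        ne_eq, pvJoin_ne_nil run hrne hrg, not_false_eq_true, if_true]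
  | cons w rest ih =>
    have hgr : ∀ u ∈ rest, pvGood u := fun u hu => hg u (by simp [hu])
    have ihp := ih hgr
    have hw : pvGood w := hg w (by simp)
    refine ⟨?_, ?_⟩
    · intro abbrs
      by_cases h : pyWordIsupper w
      · have h1 : find_abbreviation_go (w :: rest) abbrs [] =
            find_abbreviation_go rest abbrs (pvFlat [w]) := by
          simp [find_abbreviation_go, h, pvFlat]
        rw [h1, ihp.2 abbrs [w] (by simp) (by simpa using hw), pvGoB2_eq, pvAltgo_cons,
          if_pos h]
        simp
      · have h1 : find_abbreviation_go (w :: rest) abbrs [] =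
            find_abbreviation_go rest abbrs [] := by
          simp [find_abbreviation_go, h, pvStrip_nil]
        rw [h1, ihp.1 abbrs, pvAltgo_cons, if_neg (by simpa using h)]
    · intro abbrs run hrne hrg
      by_cases h : pyWordIsupper w
      · have h1 : find_abbreviation_go (w :: rest) abbrs (pvFlat run) =
            find_abbreviation_go rest abbrs (pvFlat (run ++ [w])) := by
          simp [find_abbreviation_go, h, pvFlat]
        rw [h1, ihp.2 abbrs (run ++ [w]) (by simp) ?_]
        · simp [pvGoB2, h]
        · intro u hu
          rcases List.mem_append.mp hu with hu | hu
          · exact hrg u hu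
          · simp at hu; subst hu; exact hw
      · have h1 : find_abbreviation_go (w :: rest) abbrs (pvFlat run) =
            find_abbreviation_go rest
              (abbrs ++ [String.ofList (PySem.Chars.strip (pvFlat run))]) [] := by
          simp only [find_abbreviation_go, h, if_false, Bool.false_eq_true, ne_eq,
            pvStrip_flat run hrne hrg, pvJoin_ne_nil run hrne hrg, not_false_eq_true, if_true]
        rw [h1, ihp.1, pvStrip_flat run hrne hrg]
        simp [pvGoB2, h]

-- ===== VERDICT (by name: the statement is the Claim_ definition above) =====
theorem find_abbreviation_spec : Claim_equal_find_abbreviation := by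
  intro s _
  unfold Spec_find_abbreviation find_abbreviation find_abbreviation_alt
  exact (pvMain _ (pvSplit₀_good s.toList)).1 []
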